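-- pv_equiv track=rewrite | github.com/HD50N/shu-xiang | scripts/recon_mytax_il.py | fuzzy_seed_value
-- ===== SOURCE A (Python) =====
-- SEED_VALUES = {
--     "fein": "41-2549030",
--     "federal employer": "41-2549030",
--     "ein": "41-2549030",
--     "employer identification": "41-2549030",
--     "tax id": "41-2549030",
--
--     "legal name": "Shu Xiang LLC",
--     "business name": "Shu Xiang LLC",
--     "legal business": "Shu Xiang LLC",
--     "entity name": "Shu Xiang LLC",
--     "company name": "Shu Xiang LLC",
--
--     "dba": "Shu Xiang Kitchen",
--     "doing business as": "Shu Xiang Kitchen",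
--     "trade name": "Shu Xiang Kitchen",
--     "assumed name": "Shu Xiang Kitchen",
--
--     "street": "123 W Randolph St",
--     "address line 1": "123 W Randolph St",
--     "address1": "123 W Randolph St",
--     "mailing address": "123 W Randolph St",
--     "city": "Chicago",
--     "zip": "60601",
--     "postal": "60601",
--     "state": "IL",
--     "address": "123 W Randolph St",
--
--     "owner name": "Wei Zhang",
--     "responsible party": "Wei Zhang",
--     "applicant": "Wei Zhang",
--     "first name": "Wei",
--     "last name": "Zhang",
--     "email": "wei@shuxiangchicago.com",
--     "phone": "3125551212",
--
--     "start date": "01/01/2026",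
--     "begin date": "01/01/2026",
--     "date business": "01/01/2026",
--
--     "naics": "722511",
--     "primary activity": "Restaurant",
--     "business activity": "Restaurant",
--     "description": "Full-service restaurant",
-- }
--
-- def fuzzy_seed_value(field: dict) -> str | None:
--     haystacks = [
--         (field.get("id") or "").lower(),
--         (field.get("name") or "").lower(),
--         (field.get("label") or "").lower(),
--         (field.get("placeholder") or "").lower(),
--     ]
--     for key, value in SEED_VALUES.items():
--         for h in haystacks:
--             if not h:
--                 continue
--             if key in h:
--                 return value
--     return None
-- ===== SOURCE B (Python) =====
-- SEED_VALUES = {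
--     "fein": "41-2549030",
--     "federal employer": "41-2549030",
--     "ein": "41-2549030",
--     "employer identification": "41-2549030",
--     "tax id": "41-2549030",
--
--     "legal name": "Shu Xiang LLC",
--     "business name": "Shu Xiang LLC",
--     "legal business": "Shu Xiang LLC",
--     "entity name": "Shu Xiang LLC",
--     "company name": "Shu Xiang LLC",
--
--     "dba": "Shu Xiang Kitchen",
--     "doing business as": "Shu Xiang Kitchen",
--     "trade name": "Shu Xiang Kitchen",
--     "assumed name": "Shu Xiang Kitchen",
--
--     "street": "123 W Randolph St",
--     "address line 1": "123 W Randolph St",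
--     "address1": "123 W Randolph St",
--     "mailing address": "123 W Randolph St",
--     "city": "Chicago",
--     "zip": "60601",
--     "postal": "60601",
--     "state": "IL",
--     "address": "123 W Randolph St",
--
--     "owner name": "Wei Zhang",
--     "responsible party": "Wei Zhang",
--     "applicant": "Wei Zhang",
--     "first name": "Wei",
--     "last name": "Zhang",
--     "email": "wei@shuxiangchicago.com",
--     "phone": "3125551212",
--
--     "start date": "01/01/2026",
--     "begin date": "01/01/2026",
--     "date business": "01/01/2026",
--
--     "naics": "722511",
--     "primary activity": "Restaurant",
--     "business activity": "Restaurant",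
--     "description": "Full-service restaurant",
-- }
--
-- # Inverted index over the seed keys: key -> its rank in insertion order.
-- _KEY_RANK = {k: i for i, k in enumerate(SEED_VALUES)}
-- _VALUES = list(SEED_VALUES.values())
-- _KMAX = max(len(k) for k in SEED_VALUES)
--
--
-- def fuzzy_seed_value(field: dict) -> str | None:
--     # Instead of scanning every seed key against every field, enumerate the
--     # substrings of each field (lengths capped by the longest key) and look
--     # them up in the key->rank index; the smallest rank found reproduces the
--     # dict-insertion-order tie-break.  Correct because "key in h" holds iff
--     # some substring of h equals key.
--     best = None
--     for fname in ("id", "name", "label", "placeholder"):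
--         h = (field.get(fname) or "").lower()
--         n = len(h)
--         for i in range(n):
--             for j in range(i + 1, min(n, i + _KMAX) + 1):
--                 r = _KEY_RANK.get(h[i:j])
--                 if r is not None and (best is None or r < best):
--                     best = r
--     return _VALUES[best] if best is not None else None
-- ===== Notes on version B (the rewrite author's own statement) =====
-- stated objective: alternative
-- what changed: B inverts the search: instead of testing each seed key against each field (A's key-by-haystack substring scan), it builds a key->rank hash index once, enumerates the substrings of each field with length capped by the longest key, looks each substring up in the index, and returns the value of the smallest rank found (reproducing the dict-order tie-break).
import Mathlib
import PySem

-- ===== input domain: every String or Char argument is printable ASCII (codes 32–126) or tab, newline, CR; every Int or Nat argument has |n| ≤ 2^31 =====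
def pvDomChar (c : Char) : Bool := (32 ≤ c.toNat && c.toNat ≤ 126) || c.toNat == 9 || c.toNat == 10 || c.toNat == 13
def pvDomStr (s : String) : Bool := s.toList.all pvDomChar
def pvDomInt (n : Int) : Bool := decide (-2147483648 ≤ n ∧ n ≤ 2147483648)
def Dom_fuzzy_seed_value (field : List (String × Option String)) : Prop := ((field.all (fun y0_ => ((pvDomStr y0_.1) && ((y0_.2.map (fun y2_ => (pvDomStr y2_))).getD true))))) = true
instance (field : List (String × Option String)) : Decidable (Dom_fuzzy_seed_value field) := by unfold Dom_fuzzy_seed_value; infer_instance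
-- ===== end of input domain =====

-- B inverts A's search: a key->rank index is built once, the substrings of each
-- field (length-capped by the longest key) are looked up in it, and the value of
-- the smallest rank found is returned; objective: alternative (not measured faster).

-- SEED_VALUES.items(), in insertion order (keys are distinct).
def seedValues : List (String × String) := [
  ("fein", "41-2549030"), ("federal employer", "41-2549030"), ("ein", "41-2549030"),
  ("employer identification", "41-2549030"), ("tax id", "41-2549030"),
  ("legal name", "Shu Xiang LLC"), ("business name", "Shu Xiang LLC"),
  ("legal business", "Shu Xiang LLC"), ("entity name", "Shu Xiang LLC"),
  ("company name", "Shu Xiang LLC"),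
  ("dba", "Shu Xiang Kitchen"), ("doing business as", "Shu Xiang Kitchen"),
  ("trade name", "Shu Xiang Kitchen"), ("assumed name", "Shu Xiang Kitchen"),
  ("street", "123 W Randolph St"), ("address line 1", "123 W Randolph St"),
  ("address1", "123 W Randolph St"), ("mailing address", "123 W Randolph St"),
  ("city", "Chicago"), ("zip", "60601"), ("postal", "60601"), ("state", "IL"),
  ("address", "123 W Randolph St"),
  ("owner name", "Wei Zhang"), ("responsible party", "Wei Zhang"),
  ("applicant", "Wei Zhang"), ("first name", "Wei"), ("last name", "Zhang"),
  ("email", "wei@shuxiangchicago.com"), ("phone", "3125551212"),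
  ("start date", "01/01/2026"), ("begin date", "01/01/2026"),
  ("date business", "01/01/2026"),
  ("naics", "722511"), ("primary activity", "Restaurant"),
  ("business activity", "Restaurant"), ("description", "Full-service restaurant")]

-- (field.get(k) or "").lower() — the same expression occurs in A and in B.
def getLowered (field : List (String × Option String)) (k : String) : String :=
  PySem.Str.lower (((List.lookup k field).getD none).getD "")

-- ===== PORT A =====
-- inner 'for h in haystacks: if not h: continue; if key in h: return value'
def fszInner (value : String) (key : String) (hs : List String) : Option String :=
  match hs with
  | [] => none
  | h :: t =>
    if h = "" then fszInner value key t
    else if PySem.Str.isIn key h then some value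
    else fszInner value key t

-- outer 'for key, value in SEED_VALUES.items(): …'
def fszOuter (items : List (String × String)) (hs : List String) : Option String :=
  match items with
  | [] => none
  | (k, v) :: t =>
    match fszInner v k hs with
    | some r => some r
    | none => fszOuter t hs

def fuzzy_seed_value (field : List (String × Option String)) : Option String :=
  let haystacks := [getLowered field "id", getLowered field "name",
                    getLowered field "label", getLowered field "placeholder"]
  fszOuter seedValues haystacks

-- ===== PORT B =====
-- _KEY_RANK = {k: i for i, k in enumerate(SEED_VALUES)}  (distinct keys; dict → assoc list)
def keyRank : List (String × Int) :=
  (PySem.List.enumerate (seedValues.map Prod.fst) 0).map (fun p => (p.2, p.1))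

-- _VALUES = list(SEED_VALUES.values())
def seedVals : List String := seedValues.map Prod.snd

-- _KMAX = max(len(k) for k in SEED_VALUES)  (list is nonempty, so max? is some)
def kmax : Int :=
  ((PySem.List.max? (seedValues.map (fun p => PySem.Str.len p.1)) (fun x => x)).getD 0)

-- 'if r is not None and (best is None or r < best): best = r'
def bStep (best r : Option Int) : Option Int :=
  match r with
  | none => best
  | some rv =>
    match best with
    | none => some rv
    | some b => if rv < b then some rv else best

-- 'for j in range(i + 1, min(n, i + _KMAX) + 1): r = _KEY_RANK.get(h[i:j]); …'
def bLoopJ (h : String) (i : Int) (js : List Int) (best : Option Int) : Option Int :=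
  match js with
  | [] => best
  | j :: t =>
    bLoopJ h i t (bStep best (List.lookup (PySem.Str.slice h (some i) (some j)) keyRank))

-- 'for i in range(n): …'
def bLoopI (h : String) (is : List Int) (best : Option Int) : Option Int :=
  match is with
  | [] => best
  | i :: t =>
    bLoopI h t
      (bLoopJ h i
        (PySem.List.pyRange (i + 1) (min (PySem.Str.len h) (i + kmax) + 1) 1) best)

def fuzzy_seed_value_alt (field : List (String × Option String)) : Option String :=
  let best := ["id", "name", "label", "placeholder"].foldl
    (fun best fname =>
      let h := getLowered field fname
      bLoopI h (PySem.List.pyRange 0 (PySem.Str.len h) 1) best) none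
  match best with
  | some b => some (PySem.List.pyGetD seedVals b "")
  | none => none

-- ===== PRECONDITION & SPEC =====
def Spec_fuzzy_seed_value (field : List (String × Option String)) (out : Option String) : Prop := out = fuzzy_seed_value_alt field
instance (field : List (String × Option String)) (out : Option String) : Decidable (Spec_fuzzy_seed_value field out) := by unfold Spec_fuzzy_seed_value; infer_instance

-- ===== CLAIM (what is proved, stated in full; the proofs are below) =====
def Claim_equal_fuzzy_seed_value : Prop := ∀ (field : List (String × Option String)), Dom_fuzzy_seed_value field → Spec_fuzzy_seed_value field (fuzzy_seed_value field)

-- ===== LEMMAS AND PROOFS =====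

-- option-min with none = +∞
def omin (a b : Option Int) : Option Int :=
  match a, b with
  | none, b => b
  | a, none => a
  | some x, some y => some (min x y)

-- 'o is none and S is empty, or o is the least element of S'
def IsLeastOpt (S : Int → Prop) (o : Option Int) : Prop :=
  (o = none ∧ ∀ r, ¬ S r) ∨ (∃ r, o = some r ∧ S r ∧ ∀ s, S s → r ≤ s)

theorem pv_bStep_eq_omin (best r : Option Int) : bStep best r = omin best r := by
  cases r with
  | none => cases best <;> rfl
  | some rv =>
    cases best with
    | none => rfl
    | some b =>
      simp only [bStep, omin]
      split_ifs with h <;> simp [min_def] <;> omega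

theorem pv_omin_none_right (a : Option Int) : omin a none = a := by cases a <;> rfl

theorem pv_omin_assoc (a b c : Option Int) : omin (omin a b) c = omin a (omin b c) := by
  cases a <;> cases b <;> cases c <;> simp [omin, min_assoc]

theorem pv_IsLeastOpt_congr {S S' : Int → Prop} {o : Option Int}
    (h : ∀ r, S r ↔ S' r) (ho : IsLeastOpt S o) : IsLeastOpt S' o := by
  rcases ho with ⟨h1, h2⟩ | ⟨r, h1, h2, h3⟩
  · exact Or.inl ⟨h1, fun r hr => h2 r ((h r).mpr hr)⟩
  · exact Or.inr ⟨r, h1, (h r).mp h2, fun s hs => h3 s ((h s).mpr hs)⟩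

theorem pv_omin_least {S T : Int → Prop} {a b : Option Int}
    (ha : IsLeastOpt S a) (hb : IsLeastOpt T b) :
    IsLeastOpt (fun r => S r ∨ T r) (omin a b) := by
  rcases ha with ⟨ha1, ha2⟩ | ⟨r, ha1, ha2, ha3⟩
  · subst ha1
    rcases hb with ⟨hb1, hb2⟩ | ⟨s, hb1, hb2, hb3⟩
    · subst hb1; exact Or.inl ⟨rfl, fun r hr => hr.elim (ha2 r) (hb2 r)⟩
    · subst hb1
      exact Or.inr ⟨s, rfl, Or.inr hb2,
        fun t ht => ht.elim (fun h => absurd h (ha2 t)) (hb3 t)⟩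
  · subst ha1
    rcases hb with ⟨hb1, hb2⟩ | ⟨s, hb1, hb2, hb3⟩
    · subst hb1
      exact Or.inr ⟨r, rfl, Or.inl ha2,
        fun t ht => ht.elim (ha3 t) (fun h => absurd h (hb2 t))⟩
    · subst hb1
      refine Or.inr ⟨min r s, rfl, ?_, ?_⟩
      · rcases le_total r s with h | h
        · simpa [min_eq_left h] using Or.inl ha2
        · simpa [min_eq_right h] using Or.inr hb2
      · intro t ht
        rcases ht with h | h
        · exact le_trans (min_le_left r s) (ha3 t h)
        · exact le_trans (min_le_right r s) (hb3 t h)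

-- a foldl of omin-updates starting from 'best' computes the least over S plus the candidates
theorem pv_fold_omin_least {β : Type} (f : β → Option Int) (T : β → Int → Prop)
    (hf : ∀ x, IsLeastOpt (T x) (f x)) :
    ∀ (L : List β) (best : Option Int) (S : Int → Prop), IsLeastOpt S best →
      IsLeastOpt (fun r => S r ∨ ∃ x ∈ L, T x r)
        (L.foldl (fun b x => omin b (f x)) best) := by
  intro L
  induction L with
  | nil =>
    intro best S hS
    exact pv_IsLeastOpt_congr (by simp) hS
  | cons x t ih =>
    intro best S hS
    have h1 : IsLeastOpt (fun r => S r ∨ T x r) (omin best (f x)) :=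
      pv_omin_least hS (hf x)
    have h2 := ih (omin best (f x)) _ h1
    refine pv_IsLeastOpt_congr ?_ h2
    intro r
    constructor
    · rintro ((h | h) | ⟨y, hy, h⟩)
      · exact Or.inl h
      · exact Or.inr ⟨x, by simp, h⟩
      · exact Or.inr ⟨y, by simp [hy], h⟩
    · rintro (h | ⟨y, hy, h⟩)
      · exact Or.inl (Or.inl h)
      · rcases List.mem_cons.mp hy with rfl | hy
        · exact Or.inl (Or.inr h)
        · exact Or.inr ⟨y, hy, h⟩

theorem pv_IsLeastOpt_self (o : Option Int) : IsLeastOpt (fun r => o = some r) o := by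
  cases o with
  | none => exact Or.inl ⟨rfl, fun r h => by simp at h⟩
  | some x => exact Or.inr ⟨x, rfl, rfl, fun s hs => le_of_eq (Option.some_inj.mp hs)⟩

theorem pv_fold_least {β : Type} (step : Option Int → β → Option Int) (f : β → Option Int)
    (T : β → Int → Prop) (hstep : ∀ b x, step b x = omin b (f x))
    (hf : ∀ x, IsLeastOpt (T x) (f x)) :
    ∀ (L : List β) (best : Option Int) (S : Int → Prop), IsLeastOpt S best →
      IsLeastOpt (fun r => S r ∨ ∃ x ∈ L, T x r) (L.foldl step best) := by
  have hs2 : step = fun b x => omin b (f x) := by funext b x; exact hstep b x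
  rw [hs2]
  exact pv_fold_omin_least f T hf

-- loop-body abbreviations (proof-side names for the loop ranges and the index probe)
def cand (h : String) (i j : Int) : Option Int :=
  List.lookup (PySem.Str.slice h (some i) (some j)) keyRank

def rJh (h : String) (i : Int) : List Int :=
  PySem.List.pyRange (i + 1) (min (PySem.Str.len h) (i + kmax) + 1) 1

def rIh (h : String) : List Int := PySem.List.pyRange 0 (PySem.Str.len h) 1

-- the j-loop is an omin-fold over its candidates
theorem pv_bLoopJ_foldl (h : String) (i : Int) :
    ∀ (js : List Int) (best : Option Int),
      bLoopJ h i js best = js.foldl (fun b j => omin b (cand h i j)) best := by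
  intro js
  induction js with
  | nil => intro best; rfl
  | cons j t ih => intro best; simp [bLoopJ, ih, pv_bStep_eq_omin, cand]

theorem pv_bLoopI_foldl (h : String) :
    ∀ (is : List Int) (best : Option Int),
      bLoopI h is best = is.foldl (fun b i => bLoopJ h i (rJh h i) b) best := by
  intro is
  induction is with
  | nil => intro best; rfl
  | cons i t ih => intro best; simp [bLoopI, ih, rJh]

-- omin distributes out of each loop
theorem pv_bLoopJ_omin (h : String) (i : Int) :
    ∀ (js : List Int) (a c : Option Int),
      bLoopJ h i js (omin a c) = omin a (bLoopJ h i js c) := by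
  intro js
  induction js with
  | nil => intro a c; rfl
  | cons j t ih =>
    intro a c
    simp only [bLoopJ, pv_bStep_eq_omin, pv_omin_assoc, ih]

theorem pv_bLoopJ_split (h : String) (i : Int) (js : List Int) (b : Option Int) :
    bLoopJ h i js b = omin b (bLoopJ h i js none) := by
  conv_lhs => rw [← pv_omin_none_right b]
  exact pv_bLoopJ_omin h i js b none

theorem pv_bLoopI_omin (h : String) :
    ∀ (is : List Int) (a c : Option Int),
      bLoopI h is (omin a c) = omin a (bLoopI h is c) := by
  intro is
  induction is with
  | nil => intro a c; rfl
  | cons i t ih =>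
    intro a c
    simp only [bLoopI, pv_bLoopJ_omin, ih]

theorem pv_bLoopI_split (h : String) (is : List Int) (b : Option Int) :
    bLoopI h is b = omin b (bLoopI h is none) := by
  conv_lhs => rw [← pv_omin_none_right b]
  exact pv_bLoopI_omin h is b none

-- least-element characterizations of the loops
theorem pv_bLoopJ_least (h : String) (i : Int) (js : List Int) (best : Option Int)
    (S : Int → Prop) (hS : IsLeastOpt S best) :
    IsLeastOpt (fun r => S r ∨ ∃ j ∈ js, cand h i j = some r) (bLoopJ h i js best) := by
  rw [pv_bLoopJ_foldl]
  exact pv_fold_least _ (cand h i) (fun j r => cand h i j = some r)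
    (fun b x => rfl) (fun j => pv_IsLeastOpt_self _) js best S hS

theorem pv_bLoopJ_least' (h : String) (i : Int) (js : List Int) :
    IsLeastOpt (fun r => ∃ j ∈ js, cand h i j = some r) (bLoopJ h i js none) := by
  have := pv_bLoopJ_least h i js none (fun _ => False) (Or.inl ⟨rfl, fun r hr => hr⟩)
  exact pv_IsLeastOpt_congr (fun r => by simp) this

theorem pv_bLoopI_least (h : String) (is : List Int) (best : Option Int)
    (S : Int → Prop) (hS : IsLeastOpt S best) :
    IsLeastOpt (fun r => S r ∨ ∃ i ∈ is, ∃ j ∈ rJh h i, cand h i j = some r)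
      (bLoopI h is best) := by
  rw [pv_bLoopI_foldl]
  exact pv_fold_least _ (fun i => bLoopJ h i (rJh h i) none)
    (fun i r => ∃ j ∈ rJh h i, cand h i j = some r)
    (fun b i => pv_bLoopJ_split h i (rJh h i) b)
    (fun i => pv_bLoopJ_least' h i (rJh h i)) is best S hS

theorem pv_best_least (g : String → String) (fns : List String) :
    IsLeastOpt
      (fun r => ∃ fn ∈ fns, ∃ i ∈ rIh (g fn), ∃ j ∈ rJh (g fn) i, cand (g fn) i j = some r)
      (fns.foldl (fun best fn => bLoopI (g fn) (rIh (g fn)) best) none) := by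
  have h := pv_fold_least (fun best fn => bLoopI (g fn) (rIh (g fn)) best)
    (fun fn => bLoopI (g fn) (rIh (g fn)) none)
    (fun fn r => ∃ i ∈ rIh (g fn), ∃ j ∈ rJh (g fn) i, cand (g fn) i j = some r)
    (fun b fn => pv_bLoopI_split (g fn) (rIh (g fn)) b)
    (fun fn => pv_IsLeastOpt_congr (fun r => by simp)
      (pv_bLoopI_least (g fn) (rIh (g fn)) none (fun _ => False)
        (Or.inl ⟨rfl, fun r hr => hr⟩)))
    fns none (fun _ => False) (Or.inl ⟨rfl, fun r hr => hr⟩)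
  exact pv_IsLeastOpt_congr (fun r => by simp) h

-- keys of the seed dict
def seedKeys : List String := seedValues.map Prod.fst

-- lookup in the enumerate-built rank index = position of the key
theorem pv_lookup_enum (ks : List String) (hnd : ks.Nodup) :
    ∀ (n : Int) (s : String) (r : Int),
      List.lookup s ((PySem.List.enumerate ks n).map (fun p => (p.2, p.1))) = some r ↔
      ∃ (m : Nat) (hm : m < ks.length), ks[m] = s ∧ r = n + m := by
  induction ks with
  | nil => intro n s r; simp [PySem.List.enumerate_nil]
  | cons k t ih =>
    intro n s r
    rw [PySem.List.enumerate_cons]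
    by_cases hsk : s = k
    · subst hsk
      simp only [List.map_cons, List.lookup, beq_self_eq_true, Option.some_inj]
      constructor
      · intro hr
        exact ⟨0, by simp, by simp, by omega⟩
      · rintro ⟨m, hm, hksm, rfl⟩
        cases m with
        | zero => simp
        | succ m' =>
          exfalso
          have h0 : (s :: t)[0] = s := rfl
          have : ¬ s ∈ t := (List.nodup_cons.mp hnd).1
          exact this (hksm ▸ List.getElem_mem (by simpa using Nat.lt_of_succ_lt_succ hm))
    · have hbeq : (s == k) = false := beq_false_of_ne hsk
      simp only [List.map_cons, List.lookup, hbeq]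
      rw [ih (List.nodup_cons.mp hnd).2 (n + 1) s r]
      constructor
      · rintro ⟨m, hm, hksm, rfl⟩
        exact ⟨m + 1, by simpa using Nat.succ_lt_succ hm, by simpa using hksm, by push_cast; ring⟩
      · rintro ⟨m, hm, hksm, rfl⟩
        cases m with
        | zero => exact absurd (by simpa using hksm.symm) hsk
        | succ m' =>
          exact ⟨m', by simpa using Nat.lt_of_succ_lt_succ hm, by simpa using hksm,
            by push_cast; ring⟩

theorem pv_cand_sound (h key : String) (i j : Int)
    (hi : 0 ≤ i) (hij : i + 1 ≤ j)
    (hs : PySem.Str.slice h (some i) (some j) = key) :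
    PySem.Str.isIn key h = true := by
  rw [PySem.Str.isIn_iff_infix]
  have hl : key.toList = (h.toList.drop i.toNat).take (j.toNat - i.toNat) := by
    rw [← hs]
    have : (PySem.Str.slice h (some i) (some j)).toList = PySem.Chars.slice h.toList (some i) (some j) := by
      simp [pysem]
    rw [this]
    exact PySem.List.slice_toNat h.toList hi (by omega)
  rw [hl]
  exact ((List.take_prefix _ _).isInfix).trans ((List.drop_suffix _ _).isInfix)

-- every nonempty infix of length ≤ kmax is produced by the loop bounds
theorem pv_cand_complete (h key : String)
    (hne : key.toList ≠ []) (hlen : (key.toList.length : Int) ≤ 23)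
    (hin : PySem.Str.isIn key h = true) :
    ∃ i ∈ PySem.List.pyRange 0 (PySem.Str.len h) 1,
      ∃ j ∈ PySem.List.pyRange (i + 1) (min (PySem.Str.len h) (i + 23) + 1) 1,
        PySem.Str.slice h (some i) (some j) = key := by
  obtain ⟨s, t, hst⟩ := (PySem.Str.isIn_iff_infix key h).mp hin
  have hklen : 1 ≤ key.toList.length := by
    cases hk : key.toList with
    | nil => exact absurd hk hne
    | cons a l => simp
  have hlenh : h.toList.length = s.length + key.toList.length + t.length := by
    rw [← hst]; simp; omega
  refine ⟨(s.length : Int), ?_, ((s.length : Int) + (key.toList.length : Int)), ?_, ?_⟩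
  · rw [PySem.List.mem_pyRange_one, PySem.Str.len_eq]
    constructor
    · positivity
    · push_cast [hlenh]; omega
  · rw [PySem.List.mem_pyRange_one, PySem.Str.len_eq]
    constructor
    · omega
    · push_cast [hlenh]; omega
  · have hb : (PySem.Str.slice h (some (s.length : Int)) (some ((s.length : Int) + (key.toList.length : Int)))).toList
        = PySem.Chars.slice h.toList (some (s.length : Int)) (some ((s.length : Int) + (key.toList.length : Int))) := by
      simp [pysem]
    have hc : PySem.Chars.slice h.toList (some (s.length : Int)) (some ((s.length : Int) + (key.toList.length : Int)))
        = (h.toList.drop s.length).take key.toList.length :=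
      PySem.List.slice_natCast_add h.toList s.length key.toList.length
    have hd : (h.toList.drop s.length).take key.toList.length = key.toList := by
      rw [← hst, List.append_assoc, List.drop_left, List.take_left]
    have : (PySem.Str.slice h (some (s.length : Int)) (some ((s.length : Int) + (key.toList.length : Int)))).toList = key.toList := by
      rw [hb, hc, hd]
    exact String.toList_inj.mp this

theorem pv_kmax_eq : kmax = 23 := by decide

-- A-side: the outer loop returns the value at the first matching index
theorem pv_inner_eq (v k : String) (hk : k.toList ≠ []) :
    ∀ hs : List String,
      fszInner v k hs = (if hs.any (fun h => PySem.Str.isIn k h) then some v else none) := by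
  intro hs
  induction hs with
  | nil => rfl
  | cons h t ih =>
    by_cases he : h = ""
    · subst he
      have : PySem.Chars.isIn k.toList [] = false := by
        rw [Bool.eq_false_iff]
        intro hx
        exact hk (List.eq_nil_of_infix_nil ((PySem.Chars.isIn_iff_infix _ _).mp hx))
      simp [fszInner, this, ih]
    · by_cases hin : PySem.Chars.isIn k.toList h.toList = true
      · simp [fszInner, he, hin]
      · simp [fszInner, he, hin, ih]

theorem pv_outer_eq (hs : List String) :
    ∀ (items : List (String × String)), (∀ p ∈ items, p.1.toList ≠ []) →
      fszOuter items hs =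
        (items.findIdx? (fun kv => hs.any (fun h => PySem.Str.isIn kv.1 h))).map
          (fun m => (items.map Prod.snd).getD m "") := by
  intro items
  induction items with
  | nil => intro _; rfl
  | cons p t ih =>
    intro hp
    obtain ⟨k, v⟩ := p
    have hk := hp (k, v) List.mem_cons_self
    have ht : ∀ q ∈ t, q.1.toList ≠ [] := fun q m => hp q (List.mem_cons_of_mem _ m)
    simp only [fszOuter, pv_inner_eq v k hk hs, List.findIdx?_cons]
    split_ifs with hcond
    · simp
    · rw [ih ht]
      cases t.findIdx? (fun kv => hs.any (fun h => PySem.Str.isIn kv.1 h)) <;> simp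

-- facts about the literal key list
theorem pv_keys_nodup : seedKeys.Nodup := by decide

theorem pv_keys_ok : ∀ p ∈ seedValues, p.1.toList ≠ [] ∧ (p.1.toList.length : Int) ≤ 23 := by decide

-- the index probe succeeds exactly on the positions of the seed keys
theorem pv_cand_iff (h : String) (i j r : Int) :
    cand h i j = some r ↔
      ∃ (m : Nat) (hm : m < seedKeys.length),
        seedKeys[m] = PySem.Str.slice h (some i) (some j) ∧ r = (m : Int) := by
  unfold cand keyRank
  have hsk : List.map Prod.fst seedValues = seedKeys := rfl
  rw [hsk, pv_lookup_enum seedKeys pv_keys_nodup 0 _ r]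
  constructor
  · rintro ⟨m, hm, hk, rfl⟩; exact ⟨m, hm, hk, by omega⟩
  · rintro ⟨m, hm, hk, rfl⟩; exact ⟨m, hm, hk, by omega⟩

-- a rank is produced by the loops over h iff its key occurs in h
theorem pv_T_iff (h : String) (r : Int) :
    (∃ i ∈ rIh h, ∃ j ∈ rJh h i, cand h i j = some r) ↔
      ∃ m : Nat, m < seedKeys.length ∧ r = (m : Int) ∧
        PySem.Str.isIn (seedKeys.getD m "") h = true := by
  constructor
  · rintro ⟨i, hi, j, hj, hc⟩
    rw [rIh, PySem.List.mem_pyRange_one] at hi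
    rw [rJh, PySem.List.mem_pyRange_one] at hj
    obtain ⟨m, hm, hk, rfl⟩ := (pv_cand_iff h i j _).mp hc
    refine ⟨m, hm, rfl, ?_⟩
    refine pv_cand_sound h _ i j hi.1 hj.1 ?_
    rw [List.getD_eq_getElem _ _ hm] at *
    exact hk.symm
  · rintro ⟨m, hm, rfl, hin⟩
    have hmv : m < seedValues.length := by simpa [seedKeys] using hm
    have hkey : seedKeys.getD m "" = (seedValues[m]).1 := by
      rw [List.getD_eq_getElem _ _ hm]
      simp [seedKeys]
    have hok := pv_keys_ok (seedValues[m]) (List.getElem_mem hmv)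
    obtain ⟨i, hi, j, hj, hslice⟩ :=
      pv_cand_complete h (seedKeys.getD m "") (by rw [hkey]; exact hok.1)
        (by rw [hkey]; exact hok.2) hin
    refine ⟨i, ?_, j, ?_, ?_⟩
    · simpa [rIh] using hi
    · simpa [rJh, pv_kmax_eq] using hj
    · exact (pv_cand_iff h i j _).mpr
        ⟨m, hm, by rw [← List.getD_eq_getElem _ _ hm]; exact hslice.symm, rfl⟩

set_option maxHeartbeats 2000000 in
theorem pv_main (field : List (String × Option String)) :
    fuzzy_seed_value field = fuzzy_seed_value_alt field := by
  have hA : fuzzy_seed_value field =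
      (seedValues.findIdx? (fun kv =>
          [getLowered field "id", getLowered field "name", getLowered field "label",
           getLowered field "placeholder"].any (fun h => PySem.Str.isIn kv.1 h))).map
        (fun m => (seedValues.map Prod.snd).getD m "") := by
    unfold fuzzy_seed_value
    exact pv_outer_eq _ seedValues (fun p hp => (pv_keys_ok p hp).1)
  have hB : fuzzy_seed_value_alt field =
      match (["id", "name", "label", "placeholder"].foldl
        (fun best fn => bLoopI (getLowered field fn) (rIh (getLowered field fn)) best) none) with
      | some b => some (PySem.List.pyGetD seedVals b "")
      | none => none := by
    unfold fuzzy_seed_value_alt rIh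
    rfl
  have hleast := pv_best_least (getLowered field) ["id", "name", "label", "placeholder"]
  set best := (["id", "name", "label", "placeholder"].foldl
    (fun best fn => bLoopI (getLowered field fn) (rIh (getLowered field fn)) best) none) with hbdef
  -- translate the produced-rank set into the A-side predicate
  have hStot : ∀ r : Int,
      (∃ fn ∈ ["id", "name", "label", "placeholder"],
        ∃ i ∈ rIh (getLowered field fn), ∃ j ∈ rJh (getLowered field fn) i,
          cand (getLowered field fn) i j = some r) ↔
      ∃ m : Nat, m < seedValues.length ∧ r = (m : Int) ∧
        ([getLowered field "id", getLowered field "name", getLowered field "label",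
          getLowered field "placeholder"].any
            (fun h => PySem.Str.isIn ((seedValues[m]?.map Prod.fst).getD "") h)) = true := by
    intro r
    constructor
    · rintro ⟨fn, hfn, hT⟩
      obtain ⟨m, hm, rfl, hin⟩ := (pv_T_iff _ r).mp hT
      have hmv : m < seedValues.length := by simpa [seedKeys] using hm
      refine ⟨m, hmv, rfl, ?_⟩
      have hkey : (seedValues[m]?.map Prod.fst).getD "" = seedKeys.getD m "" := by
        rw [List.getD_eq_getElem _ _ hm, List.getElem?_eq_getElem hmv]
        simp [seedKeys]
      rw [hkey]
      rw [List.any_eq_true]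
      fin_cases hfn <;> [exact ⟨_, by simp, hin⟩; exact ⟨_, by simp, hin⟩;
        exact ⟨_, by simp, hin⟩; exact ⟨_, by simp, hin⟩]
    · rintro ⟨m, hmv, rfl, hany⟩
      have hm : m < seedKeys.length := by simpa [seedKeys] using hmv
      have hkey : (seedValues[m]?.map Prod.fst).getD "" = seedKeys.getD m "" := by
        rw [List.getD_eq_getElem _ _ hm, List.getElem?_eq_getElem hmv]
        simp [seedKeys]
      rw [hkey, List.any_eq_true] at hany
      obtain ⟨h, hh, hin⟩ := hany
      simp only [List.mem_cons, List.not_mem_nil, or_false] at hh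
      rcases hh with rfl | rfl | rfl | rfl
      · exact ⟨"id", by simp, (pv_T_iff _ _).mpr ⟨m, hm, rfl, hin⟩⟩
      · exact ⟨"name", by simp, (pv_T_iff _ _).mpr ⟨m, hm, rfl, hin⟩⟩
      · exact ⟨"label", by simp, (pv_T_iff _ _).mpr ⟨m, hm, rfl, hin⟩⟩
      · exact ⟨"placeholder", by simp, (pv_T_iff _ _).mpr ⟨m, hm, rfl, hin⟩⟩
  -- A-side predicate at index m, stated through getElem?
  have hqgetD : ∀ (m : Nat) (hmv : m < seedValues.length),
      ([getLowered field "id", getLowered field "name", getLowered field "label",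
        getLowered field "placeholder"].any
          (fun h => PySem.Str.isIn ((seedValues[m]?.map Prod.fst).getD "") h)) =
      ([getLowered field "id", getLowered field "name", getLowered field "label",
        getLowered field "placeholder"].any
          (fun h => PySem.Str.isIn (seedValues[m]).1 h)) := by
    intro m hmv
    rw [List.getElem?_eq_getElem hmv]
    rfl
  rw [hA, hB]
  cases hfi : seedValues.findIdx? (fun kv =>
      [getLowered field "id", getLowered field "name", getLowered field "label",
       getLowered field "placeholder"].any (fun h => PySem.Str.isIn kv.1 h)) with
  | none =>
    have hnone := List.findIdx?_eq_none_iff.mp hfi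
    have hbn : best = none := by
      rcases hleast with ⟨hbn, _⟩ | ⟨r, hbr, hSr, _⟩
      · exact hbn
      · exfalso
        obtain ⟨m, hmv, rfl, hany⟩ := (hStot r).mp hSr
        rw [hqgetD m hmv] at hany
        have := hnone (seedValues[m]) (List.getElem_mem hmv)
        simp only [this] at hany
        exact absurd hany (by simp)
    rw [hbn]
    rfl
  | some m =>
    obtain ⟨hmv, hqm, hmin⟩ := List.findIdx?_eq_some_iff_getElem.mp hfi
    have hSm : ∃ fn ∈ ["id", "name", "label", "placeholder"],
        ∃ i ∈ rIh (getLowered field fn), ∃ j ∈ rJh (getLowered field fn) i,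
          cand (getLowered field fn) i j = some (m : Int) :=
      (hStot (m : Int)).mpr ⟨m, hmv, rfl, by rw [hqgetD m hmv]; exact hqm⟩
    have hbm : best = some (m : Int) := by
      rcases hleast with ⟨hbn, hemp⟩ | ⟨r, hbr, hSr, hle⟩
      · exact absurd hSm (hemp (m : Int))
      · obtain ⟨m', hmv', rfl, hany'⟩ := (hStot r).mp hSr
        have hq' : ([getLowered field "id", getLowered field "name", getLowered field "label",
            getLowered field "placeholder"].any
              (fun h => PySem.Str.isIn (seedValues[m']).1 h)) = true := by
          rw [← hqgetD m' hmv']; exact hany'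
        have h1 : m ≤ m' := by
          by_contra hlt
          exact (hmin m' (by omega)) hq'
        have h2 : (m' : Int) ≤ (m : Int) := hle _ hSm
        have : m' = m := by omega
        rw [hbr, this]
    rw [hbm]
    have : PySem.List.pyGetD seedVals (m : Int) "" = (seedValues.map Prod.snd).getD m "" := by
      rw [PySem.List.pyGetD_natCast]
      rfl
    simp only [Option.map_some, this]

-- ===== VERDICT (by name: the statement is the Claim_ definition above) =====
theorem fuzzy_seed_value_spec : Claim_equal_fuzzy_seed_value := by
  intro field _
  unfold Spec_fuzzy_seed_value
  exact pv_main field
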